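-- pv_equiv track=rewrite | github.com/pypi-data/pypi-mirror-226 | packages/assembly-emulator/assembly_emulator-1.0.4.tar.gz/assembly_emulator-1.0.4/assembly_emulator/asm8086_demo.py | assembly_string
-- ===== SOURCE A (Python) =====
-- import string
--
-- def check_empty_line(line):
--     for char in line:
--         if char != ' ':
--             return False
--     return True
--
-- def assembly_string(value):
--     """ Checks if a string value is constructed only from English letters """
--     dollar = value.rfind('$')
--     if dollar == -1:
--         return False
--
--     for index in range(dollar):
--         if value[index] not in string.ascii_letters and value[index] != '$' and value[index] != ' ' and value[
--             index] not in string.digits: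
--             return False
--
--     if value.rfind('$') != len(value) - 1:
--         after_space = value[value.rfind('$') + 1:]
--         if not check_empty_line(after_space):
--             return False
--     return True
-- ===== SOURCE B (Python) =====
-- import string
--
-- _OK = set(string.ascii_letters + string.digits + ' $')
--
-- def assembly_string(value):
--     """Scan from the right: skip trailing spaces, require a '$' there,
--     then every earlier character must be a letter, digit, space or '$'."""
--     rev = value[::-1]
--     i = 0
--     while i < len(rev) and rev[i] == ' ':
--         i += 1
--     if i == len(rev) or rev[i] != '$':
--         return False
--     return all(c in _OK for c in rev[i + 1:])
-- ===== Notes on version B (the rewrite author's own statement) =====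
-- stated objective: alternative
-- what changed: B replaces A's rfind-then-index-loop-over-range(dollar) plus a separate empty-suffix helper by a single right-to-left scan: reverse the string, skip trailing spaces, require a '$' there, then test the remaining characters against one precomputed allowed-set.
import Mathlib
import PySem

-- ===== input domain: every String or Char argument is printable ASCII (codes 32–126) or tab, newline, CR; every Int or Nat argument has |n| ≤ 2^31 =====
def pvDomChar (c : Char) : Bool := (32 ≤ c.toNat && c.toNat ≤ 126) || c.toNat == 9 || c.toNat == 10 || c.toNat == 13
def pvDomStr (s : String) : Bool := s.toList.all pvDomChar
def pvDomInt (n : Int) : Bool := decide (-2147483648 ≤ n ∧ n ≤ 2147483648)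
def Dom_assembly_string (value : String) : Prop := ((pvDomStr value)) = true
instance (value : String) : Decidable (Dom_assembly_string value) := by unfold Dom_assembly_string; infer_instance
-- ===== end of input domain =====

-- B re-implements A's validation as one right-to-left scan (reverse, skip trailing spaces,
-- require '$', check the rest against one allowed-set); same cost, different structure.

-- ===== PORT A =====
-- string.ascii_letters and string.digits
def asciiLetters : List Char := "abcdefghijklmnopqrstuvwxyzABCDEFGHIJKLMNOPQRSTUVWXYZ".toList
def asciiDigits : List Char := "0123456789".toList

def check_empty_line (line : List Char) : Bool :=
  match line with
  | [] => true
  | c :: cs => if c != ' ' then false else check_empty_line cs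

def assembly_string (value : String) : Bool :=
  let l := value.toList
  let dollar : Int := PySem.Chars.rfind l ['$']
  if dollar = -1 then false
  else if !((PySem.List.pyRange 0 dollar 1).all (fun index =>
      match PySem.List.pyGet? l index with
      -- 'value[index] not in string.ascii_letters' for a single character is list membership
      | some c => !(!(asciiLetters.contains c) && c != '$' && c != ' ' && !(asciiDigits.contains c))
      | none => false)) then false
  else if PySem.Chars.rfind l ['$'] ≠ (l.length : Int) - 1 then
    -- after_space = value[value.rfind('$') + 1:]
    check_empty_line (PySem.List.slice l (some (PySem.Chars.rfind l ['$'] + 1)) none)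
  else true

-- ===== PORT B =====
-- _OK = set(string.ascii_letters + string.digits + ' $')  (distinct characters, so the set is this list)
def allowedSet : List Char :=
  ("abcdefghijklmnopqrstuvwxyzABCDEFGHIJKLMNOPQRSTUVWXYZ" ++ "0123456789" ++ " $").toList

-- the `while i < len(rev) and rev[i] == ' ': i += 1` scan, consuming the leading spaces
def skipSpaces : List Char → List Char
  | [] => []
  | c :: cs => if c == ' ' then skipSpaces cs else c :: cs

def assembly_string_alt (value : String) : Bool :=
  let rev := value.toList.reverse   -- rev = value[::-1] (PySem.List.slice?_none_none_neg_one)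
  match skipSpaces rev with
  | [] => false                     -- i == len(rev)
  | c :: rest =>                    -- rev[i] = c, rev[i+1:] = rest
    c == '$' && rest.all (fun ch => allowedSet.contains ch)

-- ===== PRECONDITION & SPEC =====
def Spec_assembly_string (value : String) (out : Bool) : Prop := out = assembly_string_alt value
instance (value : String) (out : Bool) : Decidable (Spec_assembly_string value out) := by unfold Spec_assembly_string; infer_instance

-- ===== CLAIM (what is proved, stated in full; the proofs are below) =====
def Claim_equal_assembly_string : Prop := ∀ (value : String), Dom_assembly_string value → Spec_assembly_string value (assembly_string value)

-- ===== LEMMAS AND PROOFS =====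

-- the common character class
def okCh (c : Char) : Bool := asciiLetters.contains c || c == '$' || c == ' ' || asciiDigits.contains c

theorem chkA_eq (c : Char) :
    (!(!(asciiLetters.contains c) && c != '$' && c != ' ' && !(asciiDigits.contains c))) = okCh c := by
  simp [okCh, Bool.not_and, Bool.not_not, bne]

theorem allowed_eq (c : Char) : allowedSet.contains c = okCh c := by
  have h : allowedSet = asciiLetters ++ asciiDigits ++ [' ', '$'] := by rfl
  rw [h]
  by_cases h1 : c ∈ asciiLetters <;> by_cases h2 : c ∈ asciiDigits <;>
    by_cases h3 : c = '$' <;> by_cases h4 : c = ' ' <;> simp [okCh, h1, h2, h3, h4]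

theorem skipSpaces_eq (xs : List Char) : skipSpaces xs = xs.dropWhile (· == ' ') := by
  induction xs with
  | nil => rfl
  | cons c cs ih => cases hc : (c == ' ') <;> simp [skipSpaces, List.dropWhile, hc, ih]

theorem check_empty_line_eq (xs : List Char) : check_empty_line xs = xs.all (· == ' ') := by
  induction xs with
  | nil => rfl
  | cons c cs ih => by_cases h : c = ' ' <;> simp [check_empty_line, h, ih]

theorem go_zero (s sub : List Char) :
    PySem.Chars.rfind.go s sub 0 = if sub.isPrefixOf s then 0 else -1 := rfl

theorem go_succ (s sub : List Char) (j : Nat) :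
    PySem.Chars.rfind.go s sub (j+1) =
      if sub.isPrefixOf (s.drop (j+1)) then ((j:Int)+1) else PySem.Chars.rfind.go s sub j := rfl

theorem singleton_isPrefixOf_iff (t : List Char) (c : Char) :
    (([c] : List Char).isPrefixOf t) = true ↔ t.head? = some c := by
  rw [List.isPrefixOf_iff_prefix]
  cases t with
  | nil => simp
  | cons a t => simp [List.cons_prefix_cons, eq_comm]

theorem go_eq_neg_one (s : List Char) (j : Nat)
    (h : ∀ i : Nat, i ≤ j → ¬ ((['$'] : List Char).isPrefixOf (s.drop i) = true)) :
    PySem.Chars.rfind.go s ['$'] j = -1 := by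
  induction j with
  | zero => simpa [go_zero] using h 0 (le_refl 0)
  | succ j ih =>
    rw [go_succ]
    rw [if_neg (h (j+1) (le_refl _))]
    exact ih (fun i hi => h i (Nat.le_succ_of_le hi))

theorem go_eq (s : List Char) (k j : Nat)
    (hk : (['$'] : List Char).isPrefixOf (s.drop k) = true)
    (h : ∀ i : Nat, k < i → i ≤ j → ¬ ((['$'] : List Char).isPrefixOf (s.drop i) = true))
    (hkj : k ≤ j) :
    PySem.Chars.rfind.go s ['$'] j = (k : Int) := by
  induction j with
  | zero =>
    have : k = 0 := Nat.le_zero.mp hkj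
    subst this
    simp [go_zero, List.drop_zero] at hk ⊢
    simp [hk]
  | succ j ih =>
    by_cases hkj' : k = j + 1
    · subst hkj'; rw [go_succ, if_pos hk]; push_cast; ring
    · have hk_le : k ≤ j := Nat.lt_succ_iff.mp (Nat.lt_of_le_of_ne hkj hkj')
      rw [go_succ, if_neg (h (j+1) (Nat.lt_succ_of_le hk_le) (le_refl _))]
      exact ih (fun i hi hij => h i hi (Nat.le_succ_of_le hij)) hk_le

theorem rfind_eq_of_split (pre suf : List Char) (hs : '$' ∉ suf) :
    PySem.Chars.rfind (pre ++ '$' :: suf) ['$'] = (pre.length : Int) := by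
  show PySem.Chars.rfind.go _ _ _ = _
  apply go_eq
  · rw [List.drop_left]
    simp [List.isPrefixOf]
  · intro i hi hij hpre
    rw [singleton_isPrefixOf_iff] at hpre
    have hdrop : List.drop i (pre ++ '$' :: suf) = List.drop (i - pre.length - 1) suf := by
      rw [show pre ++ '$' :: suf = (pre ++ ['$']) ++ suf by simp, List.drop_append]
      have h1 : List.drop i (pre ++ ['$']) = [] := List.drop_eq_nil_of_le (by simp; omega)
      have h2 : i - (pre ++ ['$']).length = i - pre.length - 1 := by simp; omega
      rw [h1, h2, List.nil_append]
    rw [hdrop] at hpre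
    have hmem : '$' ∈ List.drop (i - pre.length - 1) suf := by
      cases hd : List.drop (i - pre.length - 1) suf with
      | nil => rw [hd] at hpre; simp at hpre
      | cons a t => rw [hd] at hpre; simp at hpre; simp [hpre]
    exact hs (List.mem_of_mem_drop hmem)
  · simp

theorem rfind_eq_neg_one (l : List Char) (h : '$' ∉ l) :
    PySem.Chars.rfind l ['$'] = -1 := by
  show PySem.Chars.rfind.go _ _ _ = _
  apply go_eq_neg_one
  intro i _ hpre
  rw [singleton_isPrefixOf_iff] at hpre
  have hmem : '$' ∈ List.drop i l := by
    cases hd : List.drop i l with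
    | nil => rw [hd] at hpre; simp at hpre
    | cons a t => rw [hd] at hpre; simp at hpre; simp [hpre]
  exact h (List.mem_of_mem_drop hmem)

theorem exists_last_split (l : List Char) (h : '$' ∈ l) :
    ∃ pre suf : List Char, l = pre ++ '$' :: suf ∧ '$' ∉ suf := by
  induction l with
  | nil => cases h
  | cons x xs ih =>
    by_cases hx : '$' ∈ xs
    · obtain ⟨pre, suf, rfl, hns⟩ := ih hx
      exact ⟨x :: pre, suf, rfl, hns⟩
    · have : x = '$' := by
        rcases List.mem_cons.mp h with h1 | h2
        · exact h1.symm
        · exact absurd h2 hx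
      exact ⟨[], xs, by simp [this], hx⟩

theorem rangeAllPy (l : List Char) (p : Char → Bool) (n : Nat) (hn : n ≤ l.length) :
    ((PySem.List.pyRange 0 (n : Int) 1).all (fun i =>
        match PySem.List.pyGet? l i with | some c => p c | none => false))
      = (l.take n).all p := by
  induction n with
  | zero =>
    rw [show ((0 : Nat) : Int) = 0 from rfl, PySem.List.pyRange_one_eq_nil (le_refl 0)]
    simp
  | succ n ih =>
    have hlt : n < l.length := hn
    have hcast : ((n + 1 : Nat) : Int) = (n : Int) + 1 := by push_cast; ring
    rw [hcast, PySem.List.pyRange_one_succ_right (by positivity), List.all_append,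
      ih (Nat.le_of_lt hlt)]
    have hget : PySem.List.pyGet? l ((n : Nat) : Int) = some l[n] := by
      rw [PySem.List.pyGet?_natCast]
      exact List.getElem?_eq_getElem hlt
    have htake : l.take (n + 1) = l.take n ++ [l[n]] := by
      rw [List.take_add_one]
      simp [List.getElem?_eq_getElem hlt]
    rw [htake, List.all_append]
    simp [hget]

theorem dropWhile_head_false {p : Char → Bool} {xs rest : List Char} {c : Char}
    (h : List.dropWhile p xs = c :: rest) : p c = false := by
  induction xs with
  | nil => simp at h
  | cons a t ih =>
    rw [List.dropWhile_cons] at h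
    by_cases ha : p a = true
    · rw [if_pos ha] at h; exact ih h
    · rw [if_neg ha] at h
      cases h
      exact Bool.not_eq_true _ |>.mp ha

theorem mem_of_dropWhile {p : Char → Bool} {xs rest : List Char} {c : Char}
    (h : List.dropWhile p xs = c :: rest) : c ∈ xs := by
  have hsub : List.Sublist (List.dropWhile p xs) xs := List.dropWhile_sublist p
  rw [h] at hsub
  exact hsub.subset (List.mem_cons_self ..)

-- A's value on a string whose last '$' splits it as pre ++ '$' :: suf
theorem A_eval (value : String) (pre suf : List Char)
    (hl : value.toList = pre ++ '$' :: suf) (hs : '$' ∉ suf) :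
    assembly_string value = (pre.all okCh && suf.all (· == ' ')) := by
  have hr := rfind_eq_of_split pre suf hs
  have hlen : (pre ++ '$' :: suf).length = pre.length + suf.length + 1 := by
    simp only [List.length_append, List.length_cons]; omega
  simp only [assembly_string, hl, hr]
  rw [if_neg (by omega)]
  simp only [chkA_eq]
  rw [show ((pre.length : Int)) = ((pre.length : Nat) : Int) from rfl,
    rangeAllPy (pre ++ '$' :: suf) okCh pre.length (by simp), List.take_left]
  cases hp : pre.all okCh with
  | false => simp
  | true =>
    rw [if_neg (by simp)]
    by_cases hsuf : suf = []
    · subst hsuf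
      rw [if_neg (by simp only [hlen, List.length_nil]; push_cast; omega)]
      simp
    · have h3 := List.length_pos_of_ne_nil hsuf
      rw [if_pos (by simp only [hlen]; push_cast; omega)]
      have hslice : PySem.List.slice (pre ++ '$' :: suf) (some ((pre.length : Int) + 1)) none
          = suf := by
        have h1 : ((pre.length : Int) + 1) = ((pre.length + 1 : Nat) : Int) := by push_cast; ring
        rw [h1, PySem.List.slice_from_natCast]
        have h4 : pre ++ '$' :: suf = (pre ++ ['$']) ++ suf := by simp
        rw [h4]
        have h2 : pre.length + 1 = (pre ++ ['$']).length := by simp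
        rw [h2, List.drop_left]
      rw [hslice, check_empty_line_eq]
      simp

theorem B_eval (value : String) (pre suf : List Char)
    (hl : value.toList = pre ++ '$' :: suf) (hs : '$' ∉ suf) :
    assembly_string_alt value = (pre.all okCh && suf.all (· == ' ')) := by
  simp only [assembly_string_alt, hl]
  rw [skipSpaces_eq]
  have hrev : (pre ++ '$' :: suf).reverse = suf.reverse ++ '$' :: pre.reverse := by
    simp
  rw [hrev]
  cases hsp : suf.all (· == ' ') with
  | true =>
    have hnil : List.dropWhile (· == ' ') suf.reverse = [] := by
      rw [List.dropWhile_eq_nil_iff]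
      intro x hx
      exact List.all_eq_true.mp hsp x (List.mem_reverse.mp hx)
    rw [List.dropWhile_append, hnil]
    simp only [List.isEmpty_nil, if_pos]
    rw [List.dropWhile_cons_of_neg (by simp)]
    simp only [beq_self_eq_true, Bool.true_and, Bool.and_true]
    rw [List.all_reverse]
    simp only [allowed_eq]
  | false =>
    have hne : List.dropWhile (· == ' ') suf.reverse ≠ [] := by
      intro hnil
      rw [List.dropWhile_eq_nil_iff] at hnil
      have : suf.all (· == ' ') = true := by
        rw [List.all_eq_true]
        intro x hx
        exact hnil x (List.mem_reverse.mpr hx)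
      rw [this] at hsp; cases hsp
    obtain ⟨c, rest, hd⟩ := List.exists_cons_of_ne_nil hne
    rw [List.dropWhile_append, hd]
    simp only [List.isEmpty_cons, if_neg, Bool.false_eq_true, not_false_eq_true]
    have hc_ne_sp : (c == ' ') = false := dropWhile_head_false (p := (· == ' ')) hd
    have hc_mem : c ∈ suf := List.mem_reverse.mp (mem_of_dropWhile hd)
    have hc_ne : (c == '$') = false := by
      simp only [beq_eq_false_iff_ne, ne_eq]
      intro hcd; subst hcd; exact hs hc_mem
    simp [hc_ne]

theorem A_eval_none (value : String) (h : '$' ∉ value.toList) :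
    assembly_string value = false := by
  simp only [assembly_string]
  simp [rfind_eq_neg_one _ h]

theorem B_eval_none (value : String) (h : '$' ∉ value.toList) :
    assembly_string_alt value = false := by
  simp only [assembly_string_alt]
  rw [skipSpaces_eq]
  cases hd : List.dropWhile (· == ' ') value.toList.reverse with
  | nil => rfl
  | cons c rest =>
    have hc_mem : c ∈ value.toList := List.mem_reverse.mp (mem_of_dropWhile hd)
    have hc_ne : (c == '$') = false := by
      simp only [beq_eq_false_iff_ne, ne_eq]
      intro hcd; subst hcd; exact h hc_mem
    simp [hc_ne]

-- ===== VERDICT (by name: the statement is the Claim_ definition above) =====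
theorem assembly_string_spec : Claim_equal_assembly_string := by
  intro value _
  unfold Spec_assembly_string
  by_cases h : '$' ∈ value.toList
  · obtain ⟨pre, suf, hl, hs⟩ := exists_last_split _ h
    rw [A_eval value pre suf hl hs, B_eval value pre suf hl hs]
  · rw [A_eval_none value h, B_eval_none value h]
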